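-- pv_equiv track=rewrite | github.com/pypi-data/pypi-mirror-390 | packages/covet/covet-0.1.0b5.tar.gz/covet-0.1.0b5/examples/minimal_covet.py | _match_path_params
-- ===== SOURCE A (Python) =====
-- from typing import Any, Callable, Dict, List, Optional
--
-- def _match_path_params(route_path: str, request_path: str) -> Optional[Dict[str, str]]:
--     """Match path parameters like /users/{id}"""
--     route_parts = route_path.split('/')
--     request_parts = request_path.split('/')
--
--     if len(route_parts) != len(request_parts):
--         return None
--
--     params = {}
--     for route_part, request_part in zip(route_parts, request_parts):
--         if route_part.startswith('{') and route_part.endswith('}'):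
--             # This is a parameter
--             param_name = route_part[1:-1]
--             params[param_name] = request_part
--         elif route_part != request_part:
--             # Static part doesn't match
--             return None
--
--     return params
-- ===== SOURCE B (Python) =====
-- def _match_path_params(route_path: str, request_path: str):
--     """Match path parameters like /users/{id}.
--
--     Single lockstep character scan: consume one '/'-delimited segment from each
--     string at a time (no split, no upfront length comparison); a length mismatch
--     surfaces naturally when one string runs out of segments before the other.
--     """
--     params = {}
--     i, j = 0, 0
--     n, m = len(route_path), len(request_path)
--     while True:
--         e1 = route_path.find('/', i)
--         if e1 < 0:
--             e1 = n
--         e2 = request_path.find('/', j)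
--         if e2 < 0:
--             e2 = m
--         r = route_path[i:e1]
--         q = request_path[j:e2]
--         if len(r) >= 2 and r[0] == '{' and r[-1] == '}':
--             params[r[1:-1]] = q
--         elif r != q:
--             return None
--         if (e1 == n) != (e2 == m):
--             return None
--         if e1 == n:
--             return params
--         i, j = e1 + 1, e2 + 1
-- ===== Notes on version B (the rewrite author's own statement) =====
-- stated objective: alternative
-- what changed: Replaced A's split-both-strings / compare-lengths / loop-over-zipped-segments algorithm by a single lockstep character scan that consumes one '/'-delimited segment from each string at a time with find/slice index arithmetic; a length mismatch surfaces when one string runs out of segments instead of being checked up front.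
import Mathlib
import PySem

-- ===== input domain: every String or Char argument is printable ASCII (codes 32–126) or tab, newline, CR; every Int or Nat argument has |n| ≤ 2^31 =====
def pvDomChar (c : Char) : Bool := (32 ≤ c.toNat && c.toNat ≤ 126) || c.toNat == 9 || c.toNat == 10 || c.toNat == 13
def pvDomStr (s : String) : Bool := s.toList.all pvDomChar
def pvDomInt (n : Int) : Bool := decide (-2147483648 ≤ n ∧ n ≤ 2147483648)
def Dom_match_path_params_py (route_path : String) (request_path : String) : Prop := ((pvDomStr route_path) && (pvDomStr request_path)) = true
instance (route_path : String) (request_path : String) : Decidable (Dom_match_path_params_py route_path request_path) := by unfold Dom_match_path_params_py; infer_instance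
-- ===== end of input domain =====

-- B replaces A's split / compare-lengths / zip loop by a single lockstep character scan that
-- consumes one '/'-delimited segment from each string at a time (no split, no upfront length
-- comparison); objective: alternative. Equivalent on all inputs (A is total).

-- ===== PORT A =====
-- the loop body of A: early-return fold over zip(route_parts, request_parts) threading the params dict
def pvLoopA : List (String × String) → PySem.Dict String String → Option (PySem.Dict String String)
  | [], params => some params
  | (r, q) :: rest, params =>
    if PySem.Str.startswith r "{" && PySem.Str.endswith r "}" then
      pvLoopA rest (params.insert (PySem.Str.slice r (some 1) (some (-1))) q)
    else if r ≠ q then none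
    else pvLoopA rest params

def match_path_params_py (route_path : String) (request_path : String) : Option (List (String × String)) :=
  let route_parts := (PySem.Str.split? route_path "/").getD []
  let request_parts := (PySem.Str.split? request_path "/").getD []
  if route_parts.length ≠ request_parts.length then none
  else (pvLoopA (route_parts.zip request_parts) PySem.Dict.empty).map PySem.Dict.items

-- ===== PORT B =====
-- Source B's param test: len(r) >= 2 and r[0] == '{' and r[-1] == '}'
def pvIsParamB (r : List Char) : Bool :=
  decide (2 ≤ r.length) && (r.head? == some '{') && (r.getLast? == some '}')

-- Source B's loop body on the two current segments r, q: insert the param, or demand equality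
def pvStepB (r q : List Char) (params : PySem.Dict String String) :
    Option (PySem.Dict String String) :=
  if pvIsParamB r then
    some (params.insert (String.ofList (PySem.List.slice r (some 1) (some (-1)))) (String.ofList q))
  else if r ≠ q then none
  else some params

-- Source B's while loop. Source B finds the segment end with s.find('/', i) and slices s[i:e1]; on the
-- not-yet-consumed characters that is exactly takeWhile/dropWhile (· ≠ '/'): the segment is
-- takeWhile, 'e1 == n' iff dropWhile = [], and 'i = e1 + 1' steps onto the tail of dropWhile.
def pvWalkB (rs qs : List Char) (params : PySem.Dict String String) :
    Option (PySem.Dict String String) :=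
  match pvStepB (rs.takeWhile (· ≠ '/')) (qs.takeWhile (· ≠ '/')) params with
  | none => none
  | some params' =>
    match _hr : rs.dropWhile (· ≠ '/'), _hq : qs.dropWhile (· ≠ '/') with
    | [], [] => some params'
    | _ :: rs', _ :: qs' => pvWalkB rs' qs' params'
    | _, _ => none
termination_by rs.length
decreasing_by
  have := List.length_dropWhile_le (fun c => decide (c ≠ '/')) rs
  simp_all

def match_path_params_py_alt (route_path : String) (request_path : String) : Option (List (String × String)) :=
  (pvWalkB route_path.toList request_path.toList PySem.Dict.empty).map PySem.Dict.items

-- ===== PRECONDITION & SPEC =====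
def Spec_match_path_params_py (route_path : String) (request_path : String) (out : Option (List (String × String))) : Prop := out = match_path_params_py_alt route_path request_path
instance (route_path : String) (request_path : String) (out : Option (List (String × String))) : Decidable (Spec_match_path_params_py route_path request_path out) := by unfold Spec_match_path_params_py; infer_instance

-- ===== CLAIM (what is proved, stated in full; the proofs are below) =====
def Claim_equal_match_path_params_py : Prop := ∀ (route_path : String) (request_path : String), Dom_match_path_params_py route_path request_path → Spec_match_path_params_py route_path request_path (match_path_params_py route_path request_path)

-- ===== LEMMAS AND PROOFS =====

-- the list of '/'-separated segments of a character list (what Python's split('/') yields)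
def pvSegs (l : List Char) : List (List Char) :=
  l.takeWhile (· ≠ '/') ::
    (match _h : l.dropWhile (· ≠ '/') with
     | [] => []
     | _ :: rest => pvSegs rest)
termination_by l.length
decreasing_by
  have := List.length_dropWhile_le (fun c => decide (c ≠ '/')) l
  simp_all

theorem pvSegs_ne_nil (l : List Char) : pvSegs l ≠ [] := by
  rw [pvSegs.eq_def]; simp

theorem pvSegs_of_drop_nil (l : List Char) (h : l.dropWhile (· ≠ '/') = []) :
    pvSegs l = [l.takeWhile (· ≠ '/')] := by
  rw [pvSegs.eq_def]; split
  · rfl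
  · rename_i heq; rw [h] at heq; exact absurd heq (by simp)

theorem pvSegs_of_drop_cons (l : List Char) (c : Char) (rest : List Char)
    (h : l.dropWhile (· ≠ '/') = c :: rest) :
    pvSegs l = l.takeWhile (· ≠ '/') :: pvSegs rest := by
  rw [pvSegs.eq_def]; split
  · rename_i heq; rw [h] at heq; exact absurd heq (by simp)
  · rename_i c' rest' heq; rw [h] at heq; cases heq; rfl

-- PySem's fueled splitOn computes pvSegs (first piece prefixed by the pending chunk)
theorem pvGo_spec : ∀ (fuel : Nat) (l cur : List Char) (acc : List (List Char)),
    l.length ≤ fuel →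
    PySem.Chars.splitOn.go ['/'] fuel l cur acc
      = acc.reverse ++ (pvSegs l).modifyHead (cur.reverse ++ ·) := by
  intro fuel
  induction fuel with
  | zero =>
    intro l cur acc h
    have hl : l = [] := List.eq_nil_of_length_eq_zero (Nat.le_zero.mp h)
    subst hl
    rw [pvSegs_of_drop_nil [] rfl]
    simp [PySem.Chars.splitOn.go]
  | succ n ih =>
    intro l cur acc h
    cases l with
    | nil =>
      rw [pvSegs_of_drop_nil [] rfl]
      simp [PySem.Chars.splitOn.go]
    | cons c rest =>
      by_cases hc : c = '/'
      · subst hc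
        rw [show PySem.Chars.splitOn.go ['/'] (n+1) ('/' :: rest) cur acc
            = PySem.Chars.splitOn.go ['/'] n rest [] (cur.reverse :: acc) by
          simp [PySem.Chars.splitOn.go, List.isPrefixOf]]
        rw [ih rest [] (cur.reverse :: acc) (by simp at h; omega)]
        rw [pvSegs_of_drop_cons ('/' :: rest) '/' rest (by rw [List.dropWhile_cons]; simp)]
        simp only [List.takeWhile_cons]
        cases pvSegs rest <;> simp
      · rw [show PySem.Chars.splitOn.go ['/'] (n+1) (c :: rest) cur acc
            = PySem.Chars.splitOn.go ['/'] n rest (c :: cur) acc by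
          simp [PySem.Chars.splitOn.go, List.isPrefixOf, Ne.symm hc]]
        rw [ih rest (c :: cur) acc (by simp at h; omega)]
        cases hd : rest.dropWhile (· ≠ '/') with
        | nil =>
          rw [pvSegs_of_drop_nil rest hd,
              pvSegs_of_drop_nil (c :: rest)
                (by rw [List.dropWhile_cons, if_pos (by simp [hc]), hd])]
          simp [hc]
        | cons c' rest' =>
          rw [pvSegs_of_drop_cons rest c' rest' hd,
              pvSegs_of_drop_cons (c :: rest) c' rest'
                (by rw [List.dropWhile_cons, if_pos (by simp [hc]), hd])]
          simp [hc]

theorem pvSplitOn_eq (l : List Char) : PySem.Chars.splitOn l ['/'] = pvSegs l := by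
  rw [PySem.Chars.splitOn, pvGo_spec (l.length + 1) l [] [] (Nat.le_succ _)]
  cases h : pvSegs l with
  | nil => exact absurd h (pvSegs_ne_nil l)
  | cons a t => simp

theorem pvSplit?_eq (s : String) :
    PySem.Str.split? s "/" = some ((pvSegs s.toList).map String.ofList) := by
  rw [PySem.Str.split?, PySem.Chars.split?]
  simp [pvSplitOn_eq]

-- A's param test ('{'-prefix and '}'-suffix) equals Source B's (length ≥ 2 plus first/last chars)
theorem pvIsParam_eq (r : List Char) :
    (PySem.Chars.startswith r ['{'] && PySem.Chars.endswith r ['}']) = pvIsParamB r := by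
  have h1 : PySem.Chars.startswith r ['{'] = true ↔ r.head? = some '{' := by
    rw [PySem.Chars.startswith_iff]
    cases r <;> simp [List.cons_prefix_cons, eq_comm]
  have h2 : PySem.Chars.endswith r ['}'] = true ↔ r.getLast? = some '}' := by
    rw [PySem.Chars.endswith_iff, ← List.reverse_prefix, ← List.head?_reverse]
    cases r.reverse <;> simp [List.cons_prefix_cons, eq_comm]
  rw [Bool.eq_iff_iff]
  simp only [Bool.and_eq_true, h1, h2, pvIsParamB]
  match r with
  | [] => simp
  | [x] =>
    simp only [List.head?, List.getLast?_singleton, List.length_singleton,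
      Option.some.injEq, beq_iff_eq, decide_eq_true_eq]
    constructor
    · rintro ⟨rfl, hy⟩
      exact absurd hy (by decide)
    · rintro ⟨⟨h2le, -⟩, -⟩
      exact absurd h2le (by omega)
  | a :: b :: t =>
    have hlen : (2 : Nat) ≤ (a :: b :: t).length := by simp
    simp

-- A's loop restated over character lists
def pvLoopA' : List (List Char × List Char) → PySem.Dict String String → Option (PySem.Dict String String)
  | [], d => some d
  | (r, q) :: rest, d =>
    match pvStepB r q d with
    | none => none
    | some d' => pvLoopA' rest d'

theorem pvLoopA_map (l : List (List Char × List Char)) (d : PySem.Dict String String) :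
    pvLoopA (l.map (Prod.map String.ofList String.ofList)) d = pvLoopA' l d := by
  induction l generalizing d with
  | nil => rfl
  | cons p rest ih =>
    obtain ⟨r, q⟩ := p
    show pvLoopA ((String.ofList r, String.ofList q) :: _) d = _
    rw [pvLoopA, pvLoopA']
    have hsw : PySem.Str.startswith (String.ofList r) "{" = PySem.Chars.startswith r ['{'] := by
      simp [PySem.Str.startswith]
    have hew : PySem.Str.endswith (String.ofList r) "}" = PySem.Chars.endswith r ['}'] := by
      simp [PySem.Str.endswith]
    have hsl : PySem.Str.slice (String.ofList r) (some 1) (some (-1))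
        = String.ofList (PySem.List.slice r (some 1) (some (-1))) := by
      simp [PySem.Str.slice, PySem.Chars.slice]
    rw [hsw, hew, pvIsParam_eq, hsl]
    simp only [pvStepB, ne_eq, String.ofList_inj]
    split_ifs with hp hne
    · exact ih _
    · exact ih d
    · rfl

-- pvWalkB unfolded at the three boundary shapes
theorem pvWalkB_nil_nil (rs qs : List Char) (d : PySem.Dict String String)
    (h1 : rs.dropWhile (· ≠ '/') = []) (h2 : qs.dropWhile (· ≠ '/') = []) :
    pvWalkB rs qs d = pvStepB (rs.takeWhile (· ≠ '/')) (qs.takeWhile (· ≠ '/')) d := by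
  rw [pvWalkB.eq_def]
  cases hs : pvStepB (rs.takeWhile (· ≠ '/')) (qs.takeWhile (· ≠ '/')) d with
  | none => rfl
  | some d' => rw [h1, h2]

theorem pvWalkB_mixed (rs qs : List Char) (d : PySem.Dict String String)
    (h : (rs.dropWhile (· ≠ '/') = [] ∧ qs.dropWhile (· ≠ '/') ≠ [])
       ∨ (rs.dropWhile (· ≠ '/') ≠ [] ∧ qs.dropWhile (· ≠ '/') = [])) :
    pvWalkB rs qs d = none := by
  rw [pvWalkB.eq_def]
  cases hs : pvStepB (rs.takeWhile (· ≠ '/')) (qs.takeWhile (· ≠ '/')) d with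
  | none => rfl
  | some d' =>
    rcases h with ⟨h1, h2⟩ | ⟨h1, h2⟩
    · rw [h1]
      cases hq : qs.dropWhile (· ≠ '/') with
      | nil => exact absurd hq h2
      | cons c t => rfl
    · rw [h2]
      cases hr : rs.dropWhile (· ≠ '/') with
      | nil => exact absurd hr h1
      | cons c t => rfl

theorem pvWalkB_cons_cons (rs qs : List Char) (d : PySem.Dict String String)
    (c c' : Char) (rs' qs' : List Char)
    (h1 : rs.dropWhile (· ≠ '/') = c :: rs') (h2 : qs.dropWhile (· ≠ '/') = c' :: qs') :
    pvWalkB rs qs d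
      = (pvStepB (rs.takeWhile (· ≠ '/')) (qs.takeWhile (· ≠ '/')) d).bind
          (fun d' => pvWalkB rs' qs' d') := by
  rw [pvWalkB.eq_def]
  cases hs : pvStepB (rs.takeWhile (· ≠ '/')) (qs.takeWhile (· ≠ '/')) d with
  | none => rfl
  | some d' => rw [h1, h2]; rfl

-- the heart of the proof: the lockstep scan equals length-check-then-zipped-segment-loop
theorem pvWalkB_eq (rs qs : List Char) (d : PySem.Dict String String) :
    pvWalkB rs qs d =
      if (pvSegs rs).length ≠ (pvSegs qs).length then none
      else pvLoopA' ((pvSegs rs).zip (pvSegs qs)) d := by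
  cases hr : rs.dropWhile (· ≠ '/') with
  | nil =>
    cases hq : qs.dropWhile (· ≠ '/') with
    | nil =>
      rw [pvWalkB_nil_nil rs qs d hr hq, pvSegs_of_drop_nil rs hr, pvSegs_of_drop_nil qs hq]
      simp only [List.length_singleton, ne_eq, not_true_eq_false, if_false,
        List.zip_cons_cons, List.zip_nil_right]
      rw [pvLoopA']
      cases pvStepB (rs.takeWhile (· ≠ '/')) (qs.takeWhile (· ≠ '/')) d with
      | none => rfl
      | some d' => rfl
    | cons c qs' =>
      rw [pvWalkB_mixed rs qs d (Or.inl ⟨hr, by rw [hq]; simp⟩),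
        pvSegs_of_drop_nil rs hr, pvSegs_of_drop_cons qs c qs' hq]
      have := pvSegs_ne_nil qs'
      rw [if_pos]
      cases h : pvSegs qs' with
      | nil => exact absurd h this
      | cons a t => simp
  | cons c rs' =>
    cases hq : qs.dropWhile (· ≠ '/') with
    | nil =>
      rw [pvWalkB_mixed rs qs d (Or.inr ⟨by rw [hr]; simp, hq⟩),
        pvSegs_of_drop_cons rs c rs' hr, pvSegs_of_drop_nil qs hq]
      have := pvSegs_ne_nil rs'
      rw [if_pos]
      cases h : pvSegs rs' with
      | nil => exact absurd h this
      | cons a t => simp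
    | cons c' qs' =>
      rw [pvWalkB_cons_cons rs qs d c c' rs' qs' hr hq,
        pvSegs_of_drop_cons rs c rs' hr, pvSegs_of_drop_cons qs c' qs' hq]
      simp only [List.zip_cons_cons, List.length_cons, ne_eq, Nat.add_right_cancel_iff]
      rw [pvLoopA']
      have ihs : ∀ d' : PySem.Dict String String, pvWalkB rs' qs' d' =
          if (pvSegs rs').length ≠ (pvSegs qs').length then none
          else pvLoopA' ((pvSegs rs').zip (pvSegs qs')) d' :=
        fun d' => pvWalkB_eq rs' qs' d'
      cases hs : pvStepB (rs.takeWhile (· ≠ '/')) (qs.takeWhile (· ≠ '/')) d with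
      | none => simp
      | some d' =>
        simp only [Option.bind_some]
        rw [ihs d']
termination_by rs.length
decreasing_by
  have := List.length_dropWhile_le (fun c => decide (c ≠ '/')) rs
  simp_all

-- ===== VERDICT (by name: the statement is the Claim_ definition above) =====
theorem match_path_params_py_spec : Claim_equal_match_path_params_py := by
  intro route_path request_path _
  unfold Spec_match_path_params_py match_path_params_py match_path_params_py_alt
  rw [pvSplit?_eq, pvSplit?_eq]
  simp only [Option.getD_some, List.length_map, List.zip_map]
  rw [pvLoopA_map, pvWalkB_eq]
  split_ifs with h <;> rfl
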